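-- pv_equiv track=rewrite | github.com/distbit0/newsToPriceCorrelator | coinWordPredict.py | categorizePosts
-- ===== SOURCE A (Python) =====
-- def categorizePosts(posts, coinNames, period):
--    import json
--    coinPosts = {}
--    for post in posts:
--       coins = [coinName for coinName in coinNames if coinName in post]
--       if len(coins) == 1:
--          coin = coins[0]
--          post = post.replace(coin, "")
--          if not coin in coinPosts.keys():
--             coinPosts[coin] = ""
--          coinPosts[coin] += post + " "
--    return coinPosts
-- ===== SOURCE B (Python) =====
-- def categorizePosts(posts, coinNames, period):
--     # Coin-major pass: for every post keep (number of matching names, first matching name),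
--     # updating the whole stats vector once per coin name.
--     stats = [(0, "")] * len(posts)
--     for name in coinNames:
--         stats = [(c + 1, f if c else name) if name in post else (c, f)
--                  for (c, f), post in zip(stats, posts)]
--     # Aggregation pass over posts whose match count is exactly one.
--     out = {}
--     for (c, f), post in zip(stats, posts):
--         if c == 1:
--             out[f] = out.get(f, "") + post.replace(f, "") + " "
--     return out
-- ===== Notes on version B (the rewrite author's own statement) =====
-- stated objective: alternative
-- what changed: B inverts the loop nesting: instead of scanning all coinNames per post, it makes one pass per coin name over a stats vector holding (match count, first matching name) for every post, then a single aggregation pass over posts with count exactly 1 builds the dict.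
import Mathlib
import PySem

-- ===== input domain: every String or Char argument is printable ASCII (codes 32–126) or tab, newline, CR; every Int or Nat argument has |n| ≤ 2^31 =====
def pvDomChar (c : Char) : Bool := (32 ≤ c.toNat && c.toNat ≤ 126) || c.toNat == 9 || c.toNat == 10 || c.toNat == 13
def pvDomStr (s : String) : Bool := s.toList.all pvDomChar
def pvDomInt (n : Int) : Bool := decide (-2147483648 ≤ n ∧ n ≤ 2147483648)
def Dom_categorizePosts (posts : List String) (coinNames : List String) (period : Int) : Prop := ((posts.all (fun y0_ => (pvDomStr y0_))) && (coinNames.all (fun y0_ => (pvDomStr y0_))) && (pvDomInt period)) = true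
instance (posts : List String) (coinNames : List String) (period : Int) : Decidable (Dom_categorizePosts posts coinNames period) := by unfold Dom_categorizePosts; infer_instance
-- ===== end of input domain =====

-- B inverts A's loop nesting: one pass per coin name over a per-post stats vector of
-- (match count, first matching name), then one aggregation pass; same return value.

-- ===== PORT A =====
-- A builds, for each post, the list of all coin names occurring in it; if exactly one,
-- it removes that coin from the post and appends the post to the coin's accumulated string.
-- coins[0] under the len == 1 guard is ported as headD "" (in range by the guard).
def categorizePosts (posts : List String) (coinNames : List String) (period : Int) : List (String × String) :=
  (posts.foldl (fun (d : PySem.Dict String String) post =>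
      let coins := coinNames.filter (fun coinName => PySem.Str.isIn coinName post)
      if coins.length = 1 then
        let coin := coins.headD ""
        let post' := PySem.Str.replace post coin ""
        let d' := if d.contains coin then d else d.insert coin ""
        d'.insert coin (d'.getD coin "" ++ post' ++ " ")
      else d)
    PySem.Dict.empty).items

-- ===== PORT B =====
-- Coin-major pass: for each name, rebuild the whole stats list via zip with posts
-- ('f if c else name' is Python int truthiness: keep f when c ≠ 0, else take name);
-- then one aggregation pass over the posts whose count is exactly 1.
def categorizePosts_alt (posts : List String) (coinNames : List String) (period : Int) : List (String × String) :=
  let stats := coinNames.foldl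
    (fun (stats : List (Int × String)) name =>
      (stats.zip posts).map (fun p =>
        if PySem.Str.isIn name p.2 then (p.1.1 + 1, if p.1.1 ≠ 0 then p.1.2 else name) else p.1))
    (posts.map (fun _ => ((0 : Int), "")))
  ((stats.zip posts).foldl
    (fun (d : PySem.Dict String String) p =>
      if p.1.1 = 1 then
        d.insert p.1.2 (d.getD p.1.2 "" ++ PySem.Str.replace p.2 p.1.2 "" ++ " ")
      else d)
    PySem.Dict.empty).items

-- ===== PRECONDITION & SPEC =====
def Spec_categorizePosts (posts : List String) (coinNames : List String) (period : Int) (out : List (String × String)) : Prop := out = categorizePosts_alt posts coinNames period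
instance (posts : List String) (coinNames : List String) (period : Int) (out : List (String × String)) : Decidable (Spec_categorizePosts posts coinNames period out) := by unfold Spec_categorizePosts; infer_instance

-- ===== CLAIM (what is proved, stated in full; the proofs are below) =====
def Claim_equal_categorizePosts : Prop := ∀ (posts : List String) (coinNames : List String) (period : Int), Dom_categorizePosts posts coinNames period → Spec_categorizePosts posts coinNames period (categorizePosts posts coinNames period)

-- ===== LEMMAS AND PROOFS =====

-- Per-post update step of B's coin-major pass, as a function of one post's state.
def pvPt (name : String) (s : Int × String) (post : String) : Int × String :=
  if PySem.Str.isIn name post then (s.1 + 1, if s.1 ≠ 0 then s.2 else name) else s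

-- Zipping a mapped copy of posts with posts pairs each post with its image.
theorem zip_map_self {α β : Type} (g : α → β) (l : List α) :
    (l.map g).zip l = l.map (fun x => (g x, x)) := by
  induction l with
  | nil => rfl
  | cons x xs ih => simp [ih]

-- B's vectorized fold over coin names acts pointwise on each post's state.
theorem build_pointwise (posts : List String) (L : List String) (g : String → Int × String) :
    L.foldl
      (fun (stats : List (Int × String)) name =>
        (stats.zip posts).map (fun p =>
          if PySem.Str.isIn name p.2 then (p.1.1 + 1, if p.1.1 ≠ 0 then p.1.2 else name) else p.1))
      (posts.map g)
    = posts.map (fun post => L.foldl (fun s name => pvPt name s post) (g post)) := by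
  induction L generalizing g with
  | nil => rfl
  | cons name L ih =>
      rw [List.foldl_cons, zip_map_self, List.map_map]
      rw [show ((fun p : (Int × String) × String =>
            if PySem.Str.isIn name p.2 then (p.1.1 + 1, if p.1.1 ≠ 0 then p.1.2 else name) else p.1)
           ∘ fun x => (g x, x)) = fun post => pvPt name (g post) post from rfl]
      rw [ih (fun post => pvPt name (g post) post)]
      simp [List.foldl_cons]

-- Once the count is positive, the first-match slot is frozen and the count just accumulates.
theorem perpost_pos (post : String) (L : List String) (c : Int) (f : String) (hc : 0 < c) :
    L.foldl (fun s name => pvPt name s post) (c, f)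
      = (c + ((L.filter (fun n => PySem.Str.isIn n post)).length : Int), f) := by
  induction L generalizing c with
  | nil => simp
  | cons x L ih =>
      rw [List.foldl_cons]
      cases hx : PySem.Str.isIn x post
      · rw [show pvPt x (c, f) post = (c, f) from by unfold pvPt; rw [hx]; simp]
        rw [ih c hc, List.filter_cons, hx]
        simp
      · rw [show pvPt x (c, f) post = (c + 1, f) from by
            unfold pvPt; rw [hx, if_pos rfl, if_pos (by omega : c ≠ 0)]]
        rw [ih (c + 1) (by omega), List.filter_cons, hx]
        simp; omega

-- From the zero state, the pass computes (number of matches, first matching name).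
theorem perpost (post : String) (L : List String) :
    L.foldl (fun s name => pvPt name s post) ((0 : Int), "")
      = (((L.filter (fun n => PySem.Str.isIn n post)).length : Int),
         (L.filter (fun n => PySem.Str.isIn n post)).headD "") := by
  cases hL : L.filter (fun n => PySem.Str.isIn n post) with
  | nil =>
      have hall : ∀ n ∈ L, PySem.Str.isIn n post = false := by
        intro n hn
        cases h : PySem.Str.isIn n post
        · rfl
        · exfalso
          have hm : n ∈ L.filter (fun n => PySem.Str.isIn n post) :=
            List.mem_filter.mpr ⟨hn, h⟩
          rw [hL] at hm
          simp at hm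
      clear hL
      induction L with
      | nil => simp
      | cons x Lt ih =>
          rw [List.foldl_cons,
            show pvPt x ((0 : Int), "") post = ((0 : Int), "") from by
              unfold pvPt; rw [hall x (by simp)]; simp]
          exact ih (fun n hn => hall n (by simp [hn]))
  | cons c0 tl =>
      induction L with
      | nil => simp at hL
      | cons x Lt ih =>
          rw [List.foldl_cons]
          rw [List.filter_cons] at hL
          cases hx : PySem.Str.isIn x post
          · rw [show pvPt x ((0 : Int), "") post = ((0 : Int), "") from by
                unfold pvPt; rw [hx]; simp]
            rw [hx, if_neg Bool.false_ne_true] at hL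
            exact ih hL
          · rw [hx, if_pos rfl] at hL
            injection hL with h1 h2
            rw [show pvPt x ((0 : Int), "") post = ((1 : Int), x) from by
                unfold pvPt; rw [hx]; simp]
            rw [perpost_pos post Lt 1 x (by omega), h2, h1]
            simp; omega

-- A's in-place "create empty entry then append" equals B's single overwrite insert.
theorem astep_eq_bstep (d : PySem.Dict String String) (coin t : String) :
    (let d' := if d.contains coin then d else d.insert coin ""
     d'.insert coin (d'.getD coin "" ++ t ++ " "))
    = d.insert coin (d.getD coin "" ++ t ++ " ") := by
  by_cases hc : d.contains coin
  · simp [hc]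
  · simp only [hc, Bool.false_eq_true, if_false]
    rw [PySem.Dict.getD_insert, if_pos rfl,
        PySem.Dict.getD_of_not_contains d ("" : String) (by simpa using hc),
        PySem.Dict.insert_insert_self]

-- Main lemma: A's post-major loop equals B's aggregation over the finished stats vector.
theorem fold_eq (coinNames : List String) (posts : List String) :
    posts.foldl (fun (d : PySem.Dict String String) post =>
      let coins := coinNames.filter (fun coinName => PySem.Str.isIn coinName post)
      if coins.length = 1 then
        let coin := coins.headD ""
        let post' := PySem.Str.replace post coin ""
        let d' := if d.contains coin then d else d.insert coin ""
        d'.insert coin (d'.getD coin "" ++ post' ++ " ")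
      else d) PySem.Dict.empty
    = ((coinNames.foldl
        (fun (stats : List (Int × String)) name =>
          (stats.zip posts).map (fun p =>
            if PySem.Str.isIn name p.2 then (p.1.1 + 1, if p.1.1 ≠ 0 then p.1.2 else name) else p.1))
        (posts.map (fun _ => ((0 : Int), "")))).zip posts).foldl
        (fun (d : PySem.Dict String String) p =>
          if p.1.1 = 1 then
            d.insert p.1.2 (d.getD p.1.2 "" ++ PySem.Str.replace p.2 p.1.2 "" ++ " ")
          else d)
        PySem.Dict.empty := by
  rw [build_pointwise posts coinNames (fun _ => ((0 : Int), ""))]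
  have hpt : (fun post : String => coinNames.foldl (fun s name => pvPt name s post) ((0 : Int), ""))
      = fun post => (((coinNames.filter (fun n => PySem.Str.isIn n post)).length : Int),
                     (coinNames.filter (fun n => PySem.Str.isIn n post)).headD "") := by
    funext post; exact perpost post coinNames
  rw [hpt, zip_map_self, List.foldl_map]
  have hstep : (fun (d : PySem.Dict String String) (post : String) =>
      (fun (d : PySem.Dict String String) (p : (Int × String) × String) =>
        if p.1.1 = 1 then
          d.insert p.1.2 (d.getD p.1.2 "" ++ PySem.Str.replace p.2 p.1.2 "" ++ " ")
        else d) d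
        ((((coinNames.filter (fun n => PySem.Str.isIn n post)).length : Int),
          (coinNames.filter (fun n => PySem.Str.isIn n post)).headD ""), post))
      = fun (d : PySem.Dict String String) (post : String) =>
        let coins := coinNames.filter (fun coinName => PySem.Str.isIn coinName post)
        if coins.length = 1 then
          let coin := coins.headD ""
          let post' := PySem.Str.replace post coin ""
          let d' := if d.contains coin then d else d.insert coin ""
          d'.insert coin (d'.getD coin "" ++ post' ++ " ")
        else d := by
    funext d post
    dsimp only
    by_cases h1 : (coinNames.filter (fun n => PySem.Str.isIn n post)).length = 1
    · rw [if_pos (show (((coinNames.filter (fun n => PySem.Str.isIn n post)).length : Nat) : Int) = 1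
          from by exact_mod_cast h1), if_pos h1]
      exact (astep_eq_bstep d _ _).symm
    · rw [if_neg (show ¬ ((((coinNames.filter (fun n => PySem.Str.isIn n post)).length : Nat) : Int) = 1)
          from by exact_mod_cast h1), if_neg h1]
  rw [hstep]

-- ===== VERDICT (by name: the statement is the Claim_ definition above) =====
theorem categorizePosts_spec : Claim_equal_categorizePosts := by
  intro posts coinNames period _
  unfold Spec_categorizePosts categorizePosts categorizePosts_alt
  rw [fold_eq]
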